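-- pv_equiv track=rewrite | github.com/ravikumarve/Alchemy | src/pipeline/content_enhancer.py | _optimize_rhythm
-- ===== SOURCE A (Python) =====
-- def _optimize_rhythm(text: str) -> str:
--     """
--     Optimize rhythm and pacing.
--
--     Args:
--         text: Original text
--
--     Returns:
--         Text with optimized rhythm
--     """
--     # This is a simplified implementation
--     # In production, would analyze syllable count and stress patterns
--     sentences = text.split('. ')
--
--     optimized = []
--     for sentence in sentences:
--         # Ensure sentences aren't too long or too short
--         words = sentence.split()
--         if len(words) > 25:
--             # Break up long sentences
--             mid = len(words) // 2
--             sentence = ' '.join(words[:mid]) + '. ' + ' '.join(words[mid:])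
--         elif len(words) < 5:
--             # Combine very short sentences with next
--             if optimized:
--                 optimized[-1] = optimized[-1].rstrip('.') + ' ' + sentence
--                 continue
--
--         optimized.append(sentence)
--
--     return '. '.join(optimized)
-- ===== SOURCE B (Python) =====
-- def _optimize_rhythm(text: str) -> str:
--     # Pass 1: process each sentence independently into (text, is_short).
--     pieces = []
--     for sentence in text.split('. '):
--         words = sentence.split()
--         if len(words) > 25:
--             mid = len(words) // 2
--             pieces.append((' '.join(words[:mid]) + '. ' + ' '.join(words[mid:]), False))
--         else:
--             pieces.append((sentence, len(words) < 5))
--     # Pass 2: fold with an explicit (finished, current) accumulator instead of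
--     # mutating the last element of a growing list.  split('. ') is never empty.
--     current = pieces[0][0]
--     finished = []
--     for proc, short in pieces[1:]:
--         if short:
--             current = current.rstrip('.') + ' ' + proc
--         else:
--             finished.append(current)
--             current = proc
--     finished.append(current)
--     return '. '.join(finished)
-- ===== Notes on version B (the rewrite author's own statement) =====
-- stated objective: alternative
-- what changed: A's single loop that mutates the last element of a growing list is re-decomposed into two passes: a map producing (processed_text, is_short) pairs, then a fold over an explicit (finished, current) accumulator where shorts merge into current and non-shorts push current onto finished.
import Mathlib
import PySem

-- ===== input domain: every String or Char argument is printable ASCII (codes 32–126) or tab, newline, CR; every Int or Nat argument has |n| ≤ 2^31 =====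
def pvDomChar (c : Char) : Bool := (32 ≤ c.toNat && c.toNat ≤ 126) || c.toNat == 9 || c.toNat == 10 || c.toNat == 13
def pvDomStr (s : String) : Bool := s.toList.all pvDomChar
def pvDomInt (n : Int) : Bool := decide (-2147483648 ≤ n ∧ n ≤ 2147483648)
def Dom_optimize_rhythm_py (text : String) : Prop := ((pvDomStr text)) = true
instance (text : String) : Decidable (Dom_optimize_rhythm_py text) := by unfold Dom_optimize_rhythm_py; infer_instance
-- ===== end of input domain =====

-- B re-decomposes A's single loop (which mutates the last element of a growing list) into two passes:
-- a map producing (processed, is_short) pairs and a fold over an explicit (finished, current) accumulator. Objective: alternative.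

-- ===== PORT A =====
-- hand port of s.rstrip('.'): drop trailing '.' characters — exact, since the strip set is the single character '.'
def pvRstripDot (cs : List Char) : List Char :=
  (cs.reverse.dropWhile (· == '.')).reverse

-- the body of A's `for sentence in sentences` loop, acting on the `optimized` accumulator
def pvLoopA (optimized : List (List Char)) (sentence : List Char) : List (List Char) :=
  let words := PySem.Chars.split₀ sentence
  if words.length > 25 then
    -- mid = len(words) // 2 : Nat division is exact (the length is nonnegative)
    let mid := words.length / 2
    optimized ++ [PySem.Chars.join " ".toList (words.take mid) ++ ". ".toList
                    ++ PySem.Chars.join " ".toList (words.drop mid)]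
  else if words.length < 5 then
    -- `optimized[-1] = optimized[-1].rstrip('.') + ' ' + sentence; continue` when optimized is non-empty
    match optimized.getLast? with
    | some last => optimized.dropLast ++ [pvRstripDot last ++ ' ' :: sentence]
    | none => optimized ++ [sentence]
  else
    optimized ++ [sentence]

def optimize_rhythm_py (text : String) : String :=
  let sentences := PySem.Chars.splitOn text.toList ". ".toList
  let optimized := sentences.foldl pvLoopA []
  String.ofList (PySem.Chars.join ". ".toList optimized)

-- ===== PORT B =====
-- B's pass 1: process one sentence into (text, is_short)
def pvProcess (sentence : List Char) : List Char × Bool :=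
  let words := PySem.Chars.split₀ sentence
  if words.length > 25 then
    let mid := words.length / 2
    (PySem.Chars.join " ".toList (words.take mid) ++ ". ".toList
       ++ PySem.Chars.join " ".toList (words.drop mid), false)
  else
    (sentence, decide (words.length < 5))

-- B's pass 2: one step of the (finished, current) fold
def pvStepB (fc : List (List Char) × List Char) (p : List Char × Bool) : List (List Char) × List Char :=
  if p.2 then (fc.1, pvRstripDot fc.2 ++ ' ' :: p.1)
  else (fc.1 ++ [fc.2], p.1)

def optimize_rhythm_py_alt (text : String) : String :=
  let pieces := (PySem.Chars.splitOn text.toList ". ".toList).map pvProcess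
  match pieces with
  | [] => ""   -- unreachable: str.split always returns a non-empty list (pv_splitOn_ne_nil below)
  | first :: rest =>
    let fc := rest.foldl pvStepB ([], first.1)
    String.ofList (PySem.Chars.join ". ".toList (fc.1 ++ [fc.2]))

-- ===== PRECONDITION & SPEC =====
def Spec_optimize_rhythm_py (text : String) (out : String) : Prop := out = optimize_rhythm_py_alt text
instance (text : String) (out : String) : Decidable (Spec_optimize_rhythm_py text out) := by unfold Spec_optimize_rhythm_py; infer_instance

-- ===== CLAIM (what is proved, stated in full; the proofs are below) =====
def Claim_equal_optimize_rhythm_py : Prop := ∀ (text : String), Dom_optimize_rhythm_py text → Spec_optimize_rhythm_py text (optimize_rhythm_py text)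

-- ===== LEMMAS AND PROOFS =====

-- str.split never returns the empty list (so B's unreachable [] branch never fires)
theorem pv_go_ne_nil (sep : List Char) (fuel : Nat) : ∀ (l cur : List Char) (acc : List (List Char)),
    PySem.Chars.splitOn.go sep fuel l cur acc ≠ [] := by
  induction fuel with
  | zero => intro l cur acc; simp [PySem.Chars.splitOn.go]
  | succ n ih =>
    intro l cur acc
    cases l with
    | nil => simp [PySem.Chars.splitOn.go]
    | cons c rest =>
      rw [PySem.Chars.splitOn.go]
      split
      · exact ih _ _ _
      · exact ih _ _ _

theorem pv_splitOn_ne_nil (s sep : List Char) : PySem.Chars.splitOn s sep ≠ [] :=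
  pv_go_ne_nil sep _ s [] []

-- A's loop step, factored through B's pass-1 processing
def pvStepA (optimized : List (List Char)) (p : List Char × Bool) : List (List Char) :=
  if p.2 then
    match optimized.getLast? with
    | some last => optimized.dropLast ++ [pvRstripDot last ++ ' ' :: p.1]
    | none => optimized ++ [p.1]
  else optimized ++ [p.1]

theorem pvStepA_eq (optimized : List (List Char)) (sentence : List Char) :
    pvLoopA optimized sentence = pvStepA optimized (pvProcess sentence) := by
  unfold pvLoopA pvProcess pvStepA
  by_cases h1 : (PySem.Chars.split₀ sentence).length > 25
  · simp [h1]
  · by_cases h2 : (PySem.Chars.split₀ sentence).length < 5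
    · simp [h1, h2]
    · simp [h1, h2]

theorem pvStepA_nil (p : List Char × Bool) : pvStepA [] p = [p.1] := by
  unfold pvStepA; split <;> simp

-- loop invariant: running A's step on `finished ++ [current]` is B's (finished, current) fold
theorem pv_foldl_inv (ps : List (List Char × Bool)) :
    ∀ (finished : List (List Char)) (current : List Char),
      ps.foldl pvStepA (finished ++ [current]) =
        (ps.foldl pvStepB (finished, current)).1 ++ [(ps.foldl pvStepB (finished, current)).2] := by
  induction ps with
  | nil => intro finished current; rfl
  | cons p ps ih =>
    intro finished current
    by_cases hp : p.2
    · have hA : pvStepA (finished ++ [current]) p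
          = finished ++ [pvRstripDot current ++ ' ' :: p.1] := by
        simp [pvStepA, hp]
      have hB : pvStepB (finished, current) p = (finished, pvRstripDot current ++ ' ' :: p.1) := by
        simp [pvStepB, hp]
      simp only [List.foldl_cons, hA, hB]
      exact ih finished _
    · have hA : pvStepA (finished ++ [current]) p = (finished ++ [current]) ++ [p.1] := by
        simp [pvStepA, hp]
      have hB : pvStepB (finished, current) p = (finished ++ [current], p.1) := by
        simp [pvStepB, hp]
      simp only [List.foldl_cons, hA, hB]
      exact ih (finished ++ [current]) p.1

-- ===== VERDICT (by name: the statement is the Claim_ definition above) =====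
theorem optimize_rhythm_py_spec : Claim_equal_optimize_rhythm_py := by
  intro text _
  unfold Spec_optimize_rhythm_py optimize_rhythm_py optimize_rhythm_py_alt
  obtain ⟨first, rest, hss⟩ : ∃ f r, PySem.Chars.splitOn text.toList ". ".toList = f :: r := by
    cases h : PySem.Chars.splitOn text.toList ". ".toList with
    | nil => exact absurd h (pv_splitOn_ne_nil _ _)
    | cons f r => exact ⟨f, r, rfl⟩
  rw [hss]
  have hlam : pvLoopA = fun a s => pvStepA a (pvProcess s) :=
    funext fun a => funext fun s => pvStepA_eq a s
  change String.ofList (PySem.Chars.join ". ".toList (List.foldl pvLoopA [] (first :: rest))) =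
    String.ofList (PySem.Chars.join ". ".toList
      ((List.foldl pvStepB ([], (pvProcess first).1) (rest.map pvProcess)).1 ++
        [(List.foldl pvStepB ([], (pvProcess first).1) (rest.map pvProcess)).2]))
  rw [hlam]
  rw [← List.foldl_map (f := pvProcess) (g := pvStepA) (l := first :: rest) (init := [])]
  simp only [List.map_cons, List.foldl_cons, pvStepA_nil]
  have hinv := pv_foldl_inv (rest.map pvProcess) [] (pvProcess first).1
  simp only [List.nil_append] at hinv
  rw [hinv]
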